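-- pv_equiv track=rewrite | github.com/JorgeG94/basis_set_generator_gms | generate_basis_sets.py | generate_unified_driver_module
-- ===== SOURCE A (Python) =====
-- def sanitize_basis_name(basis_name):
--     """Convert basis set name to valid Fortran identifier"""
--     # Replace special characters with underscores
--     safe = basis_name.lower()
--     safe = safe.replace('+', 'plus')
--     safe = safe.replace('*', 'star')
--     safe = safe.replace('(', '_')
--     safe = safe.replace(')', '')
--     safe = safe.replace(',', '_')
--     safe = safe.replace('-', '_')
--
--     # If it starts with a digit, prefix with 'b_' (for basis)
--     if safe[0].isdigit():
--         safe = 'b_' + safe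
--
--     return safe
--
-- def generate_unified_driver_module(basis_families):
--     """Generate a single unified driver module with all basis sets."""
--     fortran_lines = []
--
--     # Module header
--     fortran_lines.append("module basis_driver")
--     fortran_lines.append("  use periodic_table")
--     fortran_lines.append("  use basis_set_data, only: basis_set_type")
--     fortran_lines.append("  use basis_set_constants")
--     fortran_lines.append("  use iso_fortran_env, only: real64")
--     fortran_lines.append("  implicit none")
--     fortran_lines.append("  private")
--     fortran_lines.append("  public :: load_basis")
--     fortran_lines.append("")
--
--     # Interface for ALL worker subroutines across ALL families
--     fortran_lines.append("  interface")
--     fortran_lines.append("")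
--
--     for family_name, basis_sets in basis_families.items():
--         for basis_name in basis_sets:
--             safe_name = sanitize_basis_name(basis_name)
--             worker_name = f"get_basis_{safe_name}"
--
--             fortran_lines.append(f"    module subroutine {worker_name}(basis_data, element_number, ilast)")
--             fortran_lines.append("      type(basis_set_type), intent(out) :: basis_data")
--             fortran_lines.append("      integer, intent(in) :: element_number")
--             fortran_lines.append("      integer, intent(out) :: ilast")
--             fortran_lines.append(f"    end subroutine {worker_name}")
--             fortran_lines.append("")
--
--     fortran_lines.append("  end interface")
--     fortran_lines.append("")
--     fortran_lines.append("contains")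
--     fortran_lines.append("")
--
--     # Generate the unified load_basis subroutine
--     fortran_lines.append("  subroutine load_basis(basis_data, element_number, basis_type, ilast)")
--     fortran_lines.append("    type(basis_set_type), intent(out) :: basis_data")
--     fortran_lines.append("    integer, intent(in) :: element_number, basis_type")
--     fortran_lines.append("    integer, intent(out) :: ilast")
--     fortran_lines.append("    integer :: iw")
--     fortran_lines.append("    logical :: maswrk")
--     fortran_lines.append("")
--     fortran_lines.append("    maswrk = .true.")
--     fortran_lines.append("    iw = 6")
--     fortran_lines.append("    ilast = 0")
--     fortran_lines.append("")
--     fortran_lines.append("    select case (basis_type)")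
--     fortran_lines.append("")
--
--     # Create cases for ALL basis sets across ALL families
--     for family_name, basis_sets in basis_families.items():
--         fortran_lines.append(f"      ! {family_name.upper()} family")
--         for basis_name in basis_sets:
--             safe_name = sanitize_basis_name(basis_name)
--             const_name = safe_name.upper()
--             worker_name = f"get_basis_{safe_name}"
--
--             fortran_lines.append(f"      case ({const_name})")
--             fortran_lines.append(f"        call {worker_name}(basis_data, element_number, ilast)")
--         fortran_lines.append("")
--
--     # Default case
--     fortran_lines.append("      case default")
--     fortran_lines.append("        if(maswrk) write(iw,*) 'ERROR: Basis type', basis_type, 'not supported'")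
--     fortran_lines.append("        ilast = -1")
--     fortran_lines.append("        return")
--     fortran_lines.append("    end select")
--     fortran_lines.append("")
--     fortran_lines.append("  end subroutine load_basis")
--     fortran_lines.append("")
--     fortran_lines.append("end module basis_driver")
--
--     return '\n'.join(fortran_lines)
-- ===== SOURCE B (Python) =====
-- def sanitize_basis_name(basis_name):
--     """Convert basis set name to valid Fortran identifier"""
--     safe = basis_name.lower()
--     safe = safe.replace('+', 'plus')
--     safe = safe.replace('*', 'star')
--     safe = safe.replace('(', '_')
--     safe = safe.replace(')', '')
--     safe = safe.replace(',', '_')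
--     safe = safe.replace('-', '_')
--     if safe[0].isdigit():
--         safe = 'b_' + safe
--     return safe
--
--
-- _HEADER = (
--     "module basis_driver\n"
--     "  use periodic_table\n"
--     "  use basis_set_data, only: basis_set_type\n"
--     "  use basis_set_constants\n"
--     "  use iso_fortran_env, only: real64\n"
--     "  implicit none\n"
--     "  private\n"
--     "  public :: load_basis\n"
--     "\n"
--     "  interface\n"
--     "\n"
-- )
--
-- _MID = (
--     "  end interface\n"
--     "\n"
--     "contains\n"
--     "\n"
--     "  subroutine load_basis(basis_data, element_number, basis_type, ilast)\n"
--     "    type(basis_set_type), intent(out) :: basis_data\n"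
--     "    integer, intent(in) :: element_number, basis_type\n"
--     "    integer, intent(out) :: ilast\n"
--     "    integer :: iw\n"
--     "    logical :: maswrk\n"
--     "\n"
--     "    maswrk = .true.\n"
--     "    iw = 6\n"
--     "    ilast = 0\n"
--     "\n"
--     "    select case (basis_type)\n"
--     "\n"
-- )
--
-- _FOOTER = (
--     "      case default\n"
--     "        if(maswrk) write(iw,*) 'ERROR: Basis type', basis_type, 'not supported'\n"
--     "        ilast = -1\n"
--     "        return\n"
--     "    end select\n"
--     "\n"
--     "  end subroutine load_basis\n"
--     "\n"
--     "end module basis_driver"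
-- )
--
--
-- def generate_unified_driver_module(basis_families):
--     """Generate a single unified driver module with all basis sets.
--
--     Single pass over the families: each basis name is sanitized once and the
--     interface text and the select-case text are grown simultaneously as two
--     string accumulators; no intermediate line list, no join.
--     """
--     iface = ""
--     cases = ""
--     for family, names in basis_families.items():
--         cases += "      ! " + family.upper() + " family\n"
--         for name in names:
--             safe = sanitize_basis_name(name)
--             worker = "get_basis_" + safe
--             iface += ("    module subroutine " + worker +
--                       "(basis_data, element_number, ilast)\n"
--                       "      type(basis_set_type), intent(out) :: basis_data\n"
--                       "      integer, intent(in) :: element_number\n"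
--                       "      integer, intent(out) :: ilast\n"
--                       "    end subroutine " + worker + "\n\n")
--             cases += ("      case (" + safe.upper() + ")\n"
--                       "        call " + worker + "(basis_data, element_number, ilast)\n")
--         cases += "\n"
--     return _HEADER + iface + _MID + cases + _FOOTER
-- ===== Notes on version B (the rewrite author's own statement) =====
-- stated objective: simpler
-- what changed: A builds a global list of output lines in two separate nested scans (re-running sanitize_basis_name in each) and joins them at the end; B makes one recursive pass over the families that sanitizes each basis name once and grows the interface text and the select-case text simultaneously as two string accumulators, concatenated between constant header/mid/footer texts with no line list and no join.
import Mathlib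
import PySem

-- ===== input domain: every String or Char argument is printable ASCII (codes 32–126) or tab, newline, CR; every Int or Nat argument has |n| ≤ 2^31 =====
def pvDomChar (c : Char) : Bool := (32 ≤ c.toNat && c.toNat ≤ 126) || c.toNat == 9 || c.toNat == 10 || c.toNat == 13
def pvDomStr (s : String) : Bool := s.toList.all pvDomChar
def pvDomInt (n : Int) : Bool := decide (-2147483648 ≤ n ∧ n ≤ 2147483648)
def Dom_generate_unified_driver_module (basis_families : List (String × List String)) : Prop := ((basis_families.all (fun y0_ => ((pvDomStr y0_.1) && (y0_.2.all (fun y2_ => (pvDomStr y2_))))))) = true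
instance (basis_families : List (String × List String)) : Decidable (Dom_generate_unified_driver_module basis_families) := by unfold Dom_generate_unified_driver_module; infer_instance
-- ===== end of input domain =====

-- B replaces A's two line-list-building scans and final join by a single recursive pass that
-- sanitizes each name once and grows the interface text and the case text as two string
-- accumulators, assembled between constant header/mid/footer texts; objective: simpler.

-- ===== PORT A =====
-- shared module helper (both Pythons call the same sanitize_basis_name)
def sanitize_basis_name (basis_name : String) : String :=
  let safe := PySem.Str.lower basis_name
  let safe := PySem.Str.replace safe "+" "plus"
  let safe := PySem.Str.replace safe "*" "star"
  let safe := PySem.Str.replace safe "(" "_"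
  let safe := PySem.Str.replace safe ")" ""
  let safe := PySem.Str.replace safe "," "_"
  let safe := PySem.Str.replace safe "-" "_"
  match PySem.Str.pyGet? safe 0 with
  | none => safe   -- Python raises IndexError (safe[0] on empty string); excluded by Pre_
  | some c => if PySem.Chars.isdigit c then "b_" ++ safe else safe

def generate_unified_driver_module (basis_families : List (String × List String)) : String :=
  let fortran_lines : List String :=
    ["module basis_driver", "  use periodic_table",
     "  use basis_set_data, only: basis_set_type", "  use basis_set_constants",
     "  use iso_fortran_env, only: real64", "  implicit none", "  private",
     "  public :: load_basis", "", "  interface", ""]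
  let fortran_lines := basis_families.foldl (fun acc p =>
    p.2.foldl (fun acc2 basis_name =>
      let safe_name := sanitize_basis_name basis_name
      let worker_name := "get_basis_" ++ safe_name
      acc2 ++ ["    module subroutine " ++ worker_name ++ "(basis_data, element_number, ilast)",
               "      type(basis_set_type), intent(out) :: basis_data",
               "      integer, intent(in) :: element_number",
               "      integer, intent(out) :: ilast",
               "    end subroutine " ++ worker_name,
               ""]) acc) fortran_lines
  let fortran_lines := fortran_lines ++
    ["  end interface", "", "contains", "",
     "  subroutine load_basis(basis_data, element_number, basis_type, ilast)",
     "    type(basis_set_type), intent(out) :: basis_data",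
     "    integer, intent(in) :: element_number, basis_type",
     "    integer, intent(out) :: ilast",
     "    integer :: iw", "    logical :: maswrk", "",
     "    maswrk = .true.", "    iw = 6", "    ilast = 0", "",
     "    select case (basis_type)", ""]
  let fortran_lines := basis_families.foldl (fun acc p =>
    (p.2.foldl (fun acc2 basis_name =>
        let safe_name := sanitize_basis_name basis_name
        let const_name := PySem.Str.upper safe_name
        let worker_name := "get_basis_" ++ safe_name
        acc2 ++ ["      case (" ++ const_name ++ ")",
                 "        call " ++ worker_name ++ "(basis_data, element_number, ilast)"])
      (acc ++ ["      ! " ++ PySem.Str.upper p.1 ++ " family"])) ++ [""]) fortran_lines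
  let fortran_lines := fortran_lines ++
    ["      case default",
     "        if(maswrk) write(iw,*) 'ERROR: Basis type', basis_type, 'not supported'",
     "        ilast = -1", "        return", "    end select", "",
     "  end subroutine load_basis", "", "end module basis_driver"]
  PySem.Str.join "\n" fortran_lines

-- ===== PORT B =====
def pvHEADER : String :=
  "module basis_driver\n  use periodic_table\n  use basis_set_data, only: basis_set_type\n  use basis_set_constants\n  use iso_fortran_env, only: real64\n  implicit none\n  private\n  public :: load_basis\n\n  interface\n\n"

def pvMID : String :=
  "  end interface\n\ncontains\n\n  subroutine load_basis(basis_data, element_number, basis_type, ilast)\n    type(basis_set_type), intent(out) :: basis_data\n    integer, intent(in) :: element_number, basis_type\n    integer, intent(out) :: ilast\n    integer :: iw\n    logical :: maswrk\n\n    maswrk = .true.\n    iw = 6\n    ilast = 0\n\n    select case (basis_type)\n\n"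

def pvFOOTER : String :=
  "      case default\n        if(maswrk) write(iw,*) 'ERROR: Basis type', basis_type, 'not supported'\n        ilast = -1\n        return\n    end select\n\n  end subroutine load_basis\n\nend module basis_driver"

def generate_unified_driver_module_alt (basis_families : List (String × List String)) : String :=
  let r := basis_families.foldl (fun ac p =>
    let ac := (ac.1, ac.2 ++ ("      ! " ++ PySem.Str.upper p.1 ++ " family\n"))
    let ac := p.2.foldl (fun ac2 n =>
      let safe := sanitize_basis_name n
      let worker := "get_basis_" ++ safe
      (ac2.1 ++ ("    module subroutine " ++ worker ++
         "(basis_data, element_number, ilast)\n      type(basis_set_type), intent(out) :: basis_data\n      integer, intent(in) :: element_number\n      integer, intent(out) :: ilast\n    end subroutine " ++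
         worker ++ "\n\n"),
       ac2.2 ++ ("      case (" ++ PySem.Str.upper safe ++ ")\n        call " ++ worker ++
         "(basis_data, element_number, ilast)\n"))) ac
    (ac.1, ac.2 ++ "\n")) (("" : String), ("" : String))
  pvHEADER ++ r.1 ++ pvMID ++ r.2 ++ pvFOOTER

-- ===== PRECONDITION & SPEC =====
-- Pre_ excludes exactly the inputs where A raises IndexError: a basis name whose
-- sanitized form is empty, i.e. one consisting only of ')' characters (incl. "").
def Pre_generate_unified_driver_module (basis_families : List (String × List String)) : Prop :=
  ∀ p ∈ basis_families, ∀ b ∈ p.2, (b.toList.any (fun c => c ≠ ')')) = true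
instance (basis_families : List (String × List String)) : Decidable (Pre_generate_unified_driver_module basis_families) := by unfold Pre_generate_unified_driver_module; infer_instance

def pvWitness_generate_unified_driver_module : (List (String × List String)) :=
  [("pople", ["6-31g", "sto-3g"]), ("dunning", ["cc-pvdz"])]

def Spec_generate_unified_driver_module (basis_families : List (String × List String)) (out : String) : Prop := out = generate_unified_driver_module_alt basis_families
instance (basis_families : List (String × List String)) (out : String) : Decidable (Spec_generate_unified_driver_module basis_families out) := by unfold Spec_generate_unified_driver_module; infer_instance

-- ===== CLAIM =====
def Claim_equal_generate_unified_driver_module : Prop := ∀ (basis_families : List (String × List String)), Dom_generate_unified_driver_module basis_families → Pre_generate_unified_driver_module basis_families → Spec_generate_unified_driver_module basis_families (generate_unified_driver_module basis_families)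

-- ===== LEMMAS AND PROOFS =====

-- each line followed by a newline, concatenated
def pvCatL (ls : List String) : String := ls.foldr (fun l acc => l ++ "\n" ++ acc) ""

theorem pvJoin_cons_ne (x : String) (l : List String) (h : l ≠ []) :
    PySem.Str.join "\n" (x :: l) = x ++ "\n" ++ PySem.Str.join "\n" l := by
  cases l with
  | nil => exact absurd rfl h
  | cons y l' =>
    rw [← String.toList_inj]
    simp [PySem.Str.toList_join, PySem.Chars.join_cons_cons, String.toList_append]

theorem pvJoin_split (xs ys : List String) (h : ys ≠ []) :
    PySem.Str.join "\n" (xs ++ ys) = pvCatL xs ++ PySem.Str.join "\n" ys := by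
  induction xs with
  | nil =>
    rw [← String.toList_inj]
    simp [pvCatL]
  | cons x xs ih =>
    have hne : xs ++ ys ≠ [] := by
      intro hc; exact h (List.eq_nil_of_append_eq_nil hc).2
    rw [List.cons_append, pvJoin_cons_ne x (xs ++ ys) hne, ih,
      ← String.toList_inj]
    simp [pvCatL, String.toList_append]

theorem pvCatL_append (xs ys : List String) :
    pvCatL (xs ++ ys) = pvCatL xs ++ pvCatL ys := by
  induction xs with
  | nil => rw [← String.toList_inj]; simp [pvCatL]
  | cons x xs ih =>
    rw [List.cons_append, ← String.toList_inj]
    simp [pvCatL, String.toList_append] at ih ⊢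
    simp [ih]

theorem pvCatL_cons (x : String) (xs : List String) :
    pvCatL (x :: xs) = x ++ "\n" ++ pvCatL xs := rfl

set_option maxRecDepth 100000 in
theorem pvInner (names : List String) (ac : String × String) :
    names.foldl (fun ac2 n =>
      (ac2.1 ++ ("    module subroutine " ++ ("get_basis_" ++ sanitize_basis_name n) ++
         "(basis_data, element_number, ilast)\n      type(basis_set_type), intent(out) :: basis_data\n      integer, intent(in) :: element_number\n      integer, intent(out) :: ilast\n    end subroutine " ++
         ("get_basis_" ++ sanitize_basis_name n) ++ "\n\n"),
       ac2.2 ++ ("      case (" ++ PySem.Str.upper (sanitize_basis_name n) ++ ")\n        call " ++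
         ("get_basis_" ++ sanitize_basis_name n) ++ "(basis_data, element_number, ilast)\n"))) ac =
    (ac.1 ++ pvCatL (names.flatMap (fun n =>
       ["    module subroutine " ++ ("get_basis_" ++ sanitize_basis_name n) ++ "(basis_data, element_number, ilast)",
        "      type(basis_set_type), intent(out) :: basis_data",
        "      integer, intent(in) :: element_number",
        "      integer, intent(out) :: ilast",
        "    end subroutine " ++ ("get_basis_" ++ sanitize_basis_name n),
        ""])),
     ac.2 ++ pvCatL (names.flatMap (fun n =>
       ["      case (" ++ PySem.Str.upper (sanitize_basis_name n) ++ ")",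
        "        call " ++ ("get_basis_" ++ sanitize_basis_name n) ++ "(basis_data, element_number, ilast)"]))) := by
  induction names generalizing ac with
  | nil =>
    refine Prod.ext ?_ ?_ <;> rw [← String.toList_inj] <;> simp [pvCatL]
  | cons n rest ih =>
    rw [List.foldl_cons, ih]
    refine Prod.ext ?_ ?_ <;>
      rw [List.flatMap_cons, pvCatL_append, ← String.toList_inj] <;>
      simp [pvCatL, String.toList_append]

set_option maxRecDepth 100000 in
theorem pvOuter (bf : List (String × List String)) (ac : String × String) :
    bf.foldl (fun ac p =>
      ((p.2.foldl (fun ac2 n =>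
          (ac2.1 ++ ("    module subroutine " ++ ("get_basis_" ++ sanitize_basis_name n) ++
             "(basis_data, element_number, ilast)\n      type(basis_set_type), intent(out) :: basis_data\n      integer, intent(in) :: element_number\n      integer, intent(out) :: ilast\n    end subroutine " ++
             ("get_basis_" ++ sanitize_basis_name n) ++ "\n\n"),
           ac2.2 ++ ("      case (" ++ PySem.Str.upper (sanitize_basis_name n) ++ ")\n        call " ++
             ("get_basis_" ++ sanitize_basis_name n) ++ "(basis_data, element_number, ilast)\n")))
        (ac.1, ac.2 ++ ("      ! " ++ PySem.Str.upper p.1 ++ " family\n"))).1,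
       (p.2.foldl (fun ac2 n =>
          (ac2.1 ++ ("    module subroutine " ++ ("get_basis_" ++ sanitize_basis_name n) ++
             "(basis_data, element_number, ilast)\n      type(basis_set_type), intent(out) :: basis_data\n      integer, intent(in) :: element_number\n      integer, intent(out) :: ilast\n    end subroutine " ++
             ("get_basis_" ++ sanitize_basis_name n) ++ "\n\n"),
           ac2.2 ++ ("      case (" ++ PySem.Str.upper (sanitize_basis_name n) ++ ")\n        call " ++
             ("get_basis_" ++ sanitize_basis_name n) ++ "(basis_data, element_number, ilast)\n")))
        (ac.1, ac.2 ++ ("      ! " ++ PySem.Str.upper p.1 ++ " family\n"))).2 ++ "\n")) ac =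
    (ac.1 ++ pvCatL (bf.flatMap (fun p => p.2.flatMap (fun n =>
       ["    module subroutine " ++ ("get_basis_" ++ sanitize_basis_name n) ++ "(basis_data, element_number, ilast)",
        "      type(basis_set_type), intent(out) :: basis_data",
        "      integer, intent(in) :: element_number",
        "      integer, intent(out) :: ilast",
        "    end subroutine " ++ ("get_basis_" ++ sanitize_basis_name n),
        ""]))),
     ac.2 ++ pvCatL (bf.flatMap (fun p =>
       ("      ! " ++ PySem.Str.upper p.1 ++ " family") ::
       (p.2.flatMap (fun n =>
         ["      case (" ++ PySem.Str.upper (sanitize_basis_name n) ++ ")",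
          "        call " ++ ("get_basis_" ++ sanitize_basis_name n) ++ "(basis_data, element_number, ilast)"]) ++
        [""])))) := by
  induction bf generalizing ac with
  | nil =>
    refine Prod.ext ?_ ?_ <;> rw [← String.toList_inj] <;> simp [pvCatL]
  | cons p rest ih =>
    rw [List.foldl_cons, pvInner, ih]
    refine Prod.ext ?_ ?_
    · dsimp only
      rw [List.flatMap_cons, pvCatL_append, ← String.toList_inj]
      simp [pvCatL, String.toList_append]
    · dsimp only
      rw [List.flatMap_cons, List.cons_append, pvCatL_cons, pvCatL_append, pvCatL_append,
        ← String.toList_inj]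
      simp [pvCatL, String.toList_append]

set_option maxRecDepth 100000 in
theorem pvMain (I C : List String) :
    PySem.Str.join "\n"
      (["module basis_driver", "  use periodic_table",
        "  use basis_set_data, only: basis_set_type", "  use basis_set_constants",
        "  use iso_fortran_env, only: real64", "  implicit none", "  private",
        "  public :: load_basis", "", "  interface", ""] ++
       (I ++
        (["  end interface", "", "contains", "",
          "  subroutine load_basis(basis_data, element_number, basis_type, ilast)",
          "    type(basis_set_type), intent(out) :: basis_data",
          "    integer, intent(in) :: element_number, basis_type",
          "    integer, intent(out) :: ilast",
          "    integer :: iw", "    logical :: maswrk", "",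
          "    maswrk = .true.", "    iw = 6", "    ilast = 0", "",
          "    select case (basis_type)", ""] ++
         (C ++
          ["      case default",
           "        if(maswrk) write(iw,*) 'ERROR: Basis type', basis_type, 'not supported'",
           "        ilast = -1", "        return", "    end select", "",
           "  end subroutine load_basis", "", "end module basis_driver"])))) =
    pvHEADER ++ pvCatL I ++ pvMID ++ pvCatL C ++ pvFOOTER := by
  rw [pvJoin_split _ _ (by simp), pvJoin_split _ _ (by simp),
      pvJoin_split _ _ (by simp), pvJoin_split _ _ (by simp),
      ← String.toList_inj]
  simp [pvCatL, pvHEADER, pvMID, pvFOOTER, PySem.Str.toList_join,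
    PySem.Chars.join_cons_cons, String.toList_append]

-- ===== VERDICT =====
theorem generate_unified_driver_module_spec : Claim_equal_generate_unified_driver_module := by
  intro bf _ _
  unfold Spec_generate_unified_driver_module generate_unified_driver_module generate_unified_driver_module_alt
  simp only [PySem.List.foldl_append_eq_flatMap, List.append_assoc, List.cons_append,
    List.nil_append]
  rw [pvOuter]
  refine (pvMain _ _).trans ?_
  rw [← String.toList_inj]
  simp [String.toList_append]
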